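-- pv_equiv track=rewrite | github.com/TautvydasCerniauskas/DissertationCode | load_data.py | extractSentencePairsFromCsv
-- ===== SOURCE A (Python) =====
-- def extractSentencePairsFromCsv(sentences):
--     qa_pairs = []
--     for count, line in enumerate(sentences):
--         if count % 2 == 0:
--             inputLine = line.strip()
--         else:
--             targetLine = line.strip()
--             qa_pairs.append([inputLine, targetLine])
--     return qa_pairs
-- ===== SOURCE B (Python) =====
-- def extractSentencePairsFromCsv(sentences):
--     sentences = list(sentences)
--     return [[a.strip(), b.strip()]
--             for a, b in zip(sentences[0::2], sentences[1::2])]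
-- ===== Notes on version B (the rewrite author's own statement) =====
-- stated objective: idiomatic
-- what changed: Instead of one pass with an index-parity branch and carried inputLine/targetLine state, B first splits the list into the even-index and odd-index slices and then zips the two slices, stripping each element while building the pairs; zip truncates to the shorter slice, dropping an unpaired trailing line exactly as A does.
import Mathlib
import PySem

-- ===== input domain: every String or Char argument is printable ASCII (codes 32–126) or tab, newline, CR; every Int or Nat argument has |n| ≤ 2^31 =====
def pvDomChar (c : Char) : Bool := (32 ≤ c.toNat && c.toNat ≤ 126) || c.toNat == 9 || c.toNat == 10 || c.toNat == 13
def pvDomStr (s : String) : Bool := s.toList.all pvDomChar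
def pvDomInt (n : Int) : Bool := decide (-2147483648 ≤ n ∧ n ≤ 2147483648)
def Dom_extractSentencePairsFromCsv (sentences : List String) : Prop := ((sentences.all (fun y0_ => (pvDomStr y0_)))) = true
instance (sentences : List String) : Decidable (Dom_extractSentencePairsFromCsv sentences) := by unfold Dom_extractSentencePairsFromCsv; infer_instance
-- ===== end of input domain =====

-- B splits the list into even-index and odd-index slices and zips them, instead of A's one pass with an index-parity branch and carried state (idiomatic).

-- ===== PORT A =====
-- the loop of A: state = (count, qa_pairs, inputLine); inputLine starts unbound but
-- is always assigned at count 0 before it is read, so "" is a never-read placeholder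
def pvALoop : List String → Nat → List (List String) → String → List (List String)
  | [], _, qa, _ => qa
  | line :: rest, count, qa, inputLine =>
    if count % 2 == 0 then
      pvALoop rest (count + 1) qa (PySem.Str.strip line)
    else
      pvALoop rest (count + 1) (qa ++ [[inputLine, PySem.Str.strip line]]) inputLine

def extractSentencePairsFromCsv (sentences : List String) : List (List String) :=
  pvALoop sentences 0 [] ""

-- ===== PORT B =====
-- xs[0::2] / xs[1::2]: extended slices with step 2 (no PySem primitive; exact hand port:
-- every other element starting at the head; [1::2] is [0::2] of the tail)
def pvStride2 : List String → List String
  | [] => []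
  | [x] => [x]
  | x :: _ :: rest => x :: pvStride2 rest

def extractSentencePairsFromCsv_alt (sentences : List String) : List (List String) :=
  (List.zip (pvStride2 sentences) (pvStride2 sentences.tail)).map
    (fun p => [PySem.Str.strip p.1, PySem.Str.strip p.2])

-- ===== PRECONDITION & SPEC =====
def Spec_extractSentencePairsFromCsv (sentences : List String) (out : List (List String)) : Prop := out = extractSentencePairsFromCsv_alt sentences
instance (sentences : List String) (out : List (List String)) : Decidable (Spec_extractSentencePairsFromCsv sentences out) := by unfold Spec_extractSentencePairsFromCsv; infer_instance

-- ===== CLAIM (what is proved, stated in full; the proofs are below) =====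
def Claim_equal_extractSentencePairsFromCsv : Prop := ∀ (sentences : List String), Dom_extractSentencePairsFromCsv sentences → Spec_extractSentencePairsFromCsv sentences (extractSentencePairsFromCsv sentences)

-- ===== LEMMAS AND PROOFS =====
theorem alt_nil : extractSentencePairsFromCsv_alt [] = [] := rfl

theorem alt_single (a : String) : extractSentencePairsFromCsv_alt [a] = [] := rfl

theorem alt_cons2 (a b : String) (rest : List String) :
    extractSentencePairsFromCsv_alt (a :: b :: rest)
      = [PySem.Str.strip a, PySem.Str.strip b] :: extractSentencePairsFromCsv_alt rest := by
  cases rest with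
  | nil => rfl
  | cons c r => simp [extractSentencePairsFromCsv_alt, pvStride2]

theorem pvALoop_even (l : List String) :
    ∀ (count : Nat) (qa : List (List String)) (inputLine : String), count % 2 = 0 →
      pvALoop l count qa inputLine = qa ++ extractSentencePairsFromCsv_alt l := by
  induction l using pvStride2.induct with
  | case3 a b rest ih =>
    intro count qa inputLine h
    have h1 : ¬ ((count + 1) % 2 == 0) = true := by simp; omega
    rw [pvALoop, if_pos (by simp [h] : ((count % 2 == 0) = true)), pvALoop, if_neg h1,
        ih (count + 2) _ _ (by omega), alt_cons2]
    simp
  | case1 =>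
    intro count qa inputLine h
    simp [pvALoop, alt_nil]
  | case2 a =>
    intro count qa inputLine h
    simp [pvALoop, alt_single, h]

-- ===== VERDICT (by name: the statement is the Claim_ definition above) =====
theorem extractSentencePairsFromCsv_spec : Claim_equal_extractSentencePairsFromCsv := by
  intro sentences _
  unfold Spec_extractSentencePairsFromCsv extractSentencePairsFromCsv
  simpa using pvALoop_even sentences 0 [] "" rfl
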